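-- pv_equiv track=rewrite | github.com/Yvok51/diplomka-models | src/our_evaluation.py | collect_predictions
-- ===== SOURCE A (Python) =====
-- PredictionItem = tuple[list[str], list[str]]  # (prediction, gold)
--
-- def collect_predictions(pred_items: list[PredictionItem]) -> tuple[list[list[str]], list[list[str]], set[str]]:
--     """Extract predictions and gold labels from a list of prediction items."""
--     if not pred_items:
--         return [], [], set()
--
--     predictions, gold = zip(*pred_items)
--     labels = set()
--     for g in gold:
--         labels.update(g)
--
--     return list(predictions), list(gold), labels
-- ===== SOURCE B (Python) =====
-- PredictionItem = tuple[list[str], list[str]]  # (prediction, gold)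
--
-- def collect_predictions(pred_items: list[PredictionItem]) -> tuple[list[list[str]], list[list[str]], set[str]]:
--     """Divide and conquer: split the items in half, recurse, and merge
--     (concatenate the prediction/gold lists, union the label sets)."""
--     if not pred_items:
--         return [], [], set()
--     if len(pred_items) == 1:
--         p, g = pred_items[0]
--         return [p], [g], set(g)
--     mid = len(pred_items) // 2
--     lp, lg, ll = collect_predictions(pred_items[:mid])
--     rp, rg, rl = collect_predictions(pred_items[mid:])
--     return lp + rp, lg + rg, ll | rl
-- ===== Notes on version B (the rewrite author's own statement) =====
-- stated objective: alternative
-- what changed: Replaces A's empty guard plus zip-transpose plus separate gold-column set scan with a divide-and-conquer recursion: split the item list in half, recurse on each half, merge by concatenating the prediction/gold lists and unioning the label sets.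
import Mathlib
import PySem

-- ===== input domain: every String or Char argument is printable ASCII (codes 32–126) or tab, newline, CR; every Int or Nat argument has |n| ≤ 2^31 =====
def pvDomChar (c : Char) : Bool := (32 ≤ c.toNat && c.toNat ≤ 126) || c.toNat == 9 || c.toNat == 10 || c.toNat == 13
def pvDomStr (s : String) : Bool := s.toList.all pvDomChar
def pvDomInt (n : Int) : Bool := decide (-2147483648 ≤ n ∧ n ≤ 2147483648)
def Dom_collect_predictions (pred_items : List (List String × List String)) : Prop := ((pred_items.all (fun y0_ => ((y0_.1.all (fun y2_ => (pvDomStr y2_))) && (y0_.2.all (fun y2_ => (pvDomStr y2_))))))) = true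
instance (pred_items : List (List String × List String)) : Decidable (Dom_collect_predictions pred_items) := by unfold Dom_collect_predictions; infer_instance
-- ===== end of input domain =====

-- ===== PORT A =====
-- One honest line: B replaces A's zip-transpose + gold-column scan by a divide-and-conquer
-- recursion (split in half, recurse, concatenate lists and union label sets) — objective: alternative.
def collect_predictions (pred_items : List (List String × List String)) : List (List String) × List (List String) × List String :=
  if pred_items = [] then ([], [], PySem.Set.empty)
  else
    let predictions := pred_items.map Prod.fst
    let gold := pred_items.map Prod.snd
    let labels := gold.foldl (fun s g => PySem.Set.update s g) PySem.Set.empty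
    (predictions, gold, labels)

-- ===== PORT B =====
-- pred_items[:mid] / pred_items[mid:] are take/drop (PySem.List.slice_to_natCast / slice_from_natCast);
-- len//2 on a Nat length is Nat division (exact for nonnegative operands).
def collect_predictions_alt (pred_items : List (List String × List String)) : List (List String) × List (List String) × List String :=
  match pred_items with
  | [] => ([], [], PySem.Set.empty)
  | [pg] => ([pg.1], [pg.2], PySem.Set.ofList pg.2)
  | x :: y :: rest =>
    let mid := (x :: y :: rest).length / 2
    let l := collect_predictions_alt ((x :: y :: rest).take mid)
    let r := collect_predictions_alt ((x :: y :: rest).drop mid)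
    (l.1 ++ r.1, l.2.1 ++ r.2.1, PySem.Set.union l.2.2 r.2.2)
termination_by pred_items.length
decreasing_by
  · simp [List.length_take]; omega
  · simp [List.length_drop]; omega

-- ===== PRECONDITION & SPEC =====
def Spec_collect_predictions (pred_items : List (List String × List String)) (out : List (List String) × List (List String) × List String) : Prop := out = collect_predictions_alt pred_items
instance (pred_items : List (List String × List String)) (out : List (List String) × List (List String) × List String) : Decidable (Spec_collect_predictions pred_items out) := by unfold Spec_collect_predictions; infer_instance

-- ===== CLAIM (what is proved, stated in full; the proofs are below) =====
def Claim_equal_collect_predictions : Prop := ∀ (pred_items : List (List String × List String)), Dom_collect_predictions pred_items → Spec_collect_predictions pred_items (collect_predictions pred_items)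

-- ===== LEMMAS AND PROOFS =====

-- A's gold loop: folding `update` over a list of lists is one `update` by the flattened list.
theorem foldl_update_eq_update_flatten {a : Type} [BEq a] [LawfulBEq a]
    (gs : List (List a)) (s : PySem.Set a) :
    gs.foldl (fun s g => PySem.Set.update s g) s = PySem.Set.update s gs.flatten := by
  induction gs generalizing s with
  | nil => simp [PySem.Set.update_nil]
  | cons g gs ih => simp [List.foldl, ih, PySem.Set.update_append]

-- Updating by a deduplicated list is updating by the list itself.
theorem update_ofList {a : Type} [BEq a] [LawfulBEq a] (s : PySem.Set a) (xs : List a) :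
    PySem.Set.update s (PySem.Set.ofList xs) = PySem.Set.update s xs := by
  rw [PySem.Set.update_eq_append_filter, PySem.Set.update_eq_append_filter, PySem.Set.ofList_ofList]

-- Characterisation of B: it returns the two column maps and the set of all gold labels in order.
theorem alt_char (pred_items : List (List String × List String)) :
    collect_predictions_alt pred_items =
      (pred_items.map Prod.fst, pred_items.map Prod.snd,
       PySem.Set.ofList (pred_items.map Prod.snd).flatten) := by
  fun_induction collect_predictions_alt pred_items with
  | case1 => simp [PySem.Set.empty]
  | case2 pg => simp
  | case3 x y rest mid l r ihl ihr =>
    simp only [l, r] at *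
    rw [ihl, ihr]
    have hsplit : (x :: y :: rest).take mid ++ (x :: y :: rest).drop mid = x :: y :: rest :=
      List.take_append_drop _ _
    refine Prod.ext ?_ (Prod.ext ?_ ?_) <;> simp only
    · rw [← List.map_append, hsplit]
    · rw [← List.map_append, hsplit]
    · show PySem.Set.union _ _ = _
      rw [PySem.Set.union, update_ofList, ← PySem.Set.ofList_append,
        ← List.flatten_append, ← List.map_append, hsplit]

-- ===== VERDICT (by name: the statement is the Claim_ definition above) =====
theorem collect_predictions_spec : Claim_equal_collect_predictions := by
  intro pred_items _
  unfold Spec_collect_predictions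
  rw [alt_char]
  unfold collect_predictions
  split
  · subst ‹pred_items = []›; simp [PySem.Set.empty]
  · simp [foldl_update_eq_update_flatten, PySem.Set.update_nil_left]
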